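-- pv_equiv track=rewrite | github.com/legomaheggoz-source/DevilsDozen | src/ui/views/game.py | _get_potentially_scoring_indices_d20_t1
-- ===== SOURCE A (Python) =====
-- def _get_potentially_scoring_indices_d20_t1(dice: list[int]) -> set[int]:
--     """Get all dice indices that could participate in any D20 Tier 1 scoring combo.
--
--     A die is potentially scoring if it:
--     - Is a 1 or 5 (always scores as single)
--     - Has at least one duplicate (pair/triple potential)
--     - Is part of a consecutive sequence of 3+ among the roll values
--     """
--     from collections import Counter as Ctr
--
--     scoring: set[int] = set()
--     counts = Ctr(dice)
--     sorted_unique = sorted(set(dice))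
--
--     # Find all values that belong to a consecutive run of 3+
--     seq_values: set[int] = set()
--     i = 0
--     while i < len(sorted_unique):
--         seq = [sorted_unique[i]]
--         j = i + 1
--         while j < len(sorted_unique) and sorted_unique[j] == seq[-1] + 1:
--             seq.append(sorted_unique[j])
--             j += 1
--         if len(seq) >= 3:
--             seq_values.update(seq)
--         i = j if j > i + 1 else i + 1
--
--     for idx, val in enumerate(dice):
--         if val in (1, 5):
--             scoring.add(idx)
--         if counts[val] >= 2:
--             scoring.add(idx)
--         if val in seq_values:
--             scoring.add(idx)
--
--     return scoring
-- ===== SOURCE B (Python) =====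
-- def _get_potentially_scoring_indices_d20_t1(dice: list[int]) -> set[int]:
--     """Set/Counter re-implementation: no sort, no run-scanning.
--
--     A value belongs to a consecutive run of 3+ distinct values iff one of the
--     three windows {v-2,v-1,v}, {v-1,v,v+1}, {v,v+1,v+2} lies entirely in the
--     set of rolled values.
--     """
--     from collections import Counter as Ctr
--
--     present = set(dice)
--     counts = Ctr(dice)
--
--     def is_scoring_value(v: int) -> bool:
--         if v in (1, 5) or counts[v] >= 2:
--             return True
--         return ((v - 2 in present and v - 1 in present)
--                 or (v - 1 in present and v + 1 in present)
--                 or (v + 1 in present and v + 2 in present))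
--
--     return {idx for idx, val in enumerate(dice) if is_scoring_value(val)}
-- ===== Notes on version B (the rewrite author's own statement) =====
-- stated objective: simpler
-- what changed: B drops A's sort and ordered consecutive-run scan entirely: it builds set(dice) and Counter(dice) once and decides run-membership of each value with three O(1) set-window lookups ((v-2,v-1), (v-1,v+1) or (v+1,v+2) all present), then keeps the indices whose value scores.
import Mathlib
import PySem

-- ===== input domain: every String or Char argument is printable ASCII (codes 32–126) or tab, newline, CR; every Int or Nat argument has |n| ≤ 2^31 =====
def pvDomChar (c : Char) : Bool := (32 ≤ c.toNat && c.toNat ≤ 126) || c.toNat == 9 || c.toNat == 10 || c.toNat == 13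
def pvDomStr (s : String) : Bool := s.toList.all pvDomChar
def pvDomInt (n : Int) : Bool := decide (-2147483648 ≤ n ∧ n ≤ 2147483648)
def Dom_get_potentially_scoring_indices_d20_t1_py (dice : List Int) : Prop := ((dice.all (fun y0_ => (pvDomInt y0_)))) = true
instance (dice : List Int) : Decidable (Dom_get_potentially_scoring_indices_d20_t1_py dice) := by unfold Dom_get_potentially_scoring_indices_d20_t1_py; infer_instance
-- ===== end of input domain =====

-- B replaces A's sort + consecutive-run scan by direct set-window membership tests (objective: simpler).

-- ===== PORT A =====
-- A's inner while loop: extend the current consecutive run, return (collected tail, remainder)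
def pvSeqRun (last : Int) : List Int → List Int × List Int
  | [] => ([], [])
  | y :: r =>
      if y = last + 1 then
        ((y :: (pvSeqRun y r).1), (pvSeqRun y r).2)
      else ([], y :: r)

-- termination measure for the outer loop (cited in decreasing_by)
theorem pvSeqRun_snd_length_le : ∀ (r : List Int) (last : Int), (pvSeqRun last r).2.length ≤ r.length
  | [], _ => Nat.le_refl _
  | y :: r, last => by
      by_cases h : y = last + 1
      · simpa [pvSeqRun, h] using Nat.le_succ_of_le (pvSeqRun_snd_length_le r y)
      · simp [pvSeqRun, h]

-- A's outer while loop: accumulate values of each maximal consecutive run of length ≥ 3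
def pvSeqLoop (acc : PySem.Set Int) : List Int → PySem.Set Int
  | [] => acc
  | x :: r =>
      pvSeqLoop
        (if 3 ≤ (x :: (pvSeqRun x r).1).length then PySem.Set.update acc (x :: (pvSeqRun x r).1) else acc)
        (pvSeqRun x r).2
  termination_by s => s.length
  decreasing_by exact Nat.lt_succ_of_le (pvSeqRun_snd_length_le _ _)

def get_potentially_scoring_indices_d20_t1_py (dice : List Int) : List Int :=
  let counts := PySem.Dict.counter dice
  let sorted_unique := PySem.List.sorted (PySem.Set.ofList dice) (fun x => x) false
  let seq_values := pvSeqLoop PySem.Set.empty sorted_unique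
  (PySem.List.enumerate dice).foldl
    (fun scoring p =>
      let scoring := if p.2 = 1 ∨ p.2 = 5 then PySem.Set.add scoring p.1 else scoring
      let scoring := if 2 ≤ counts.getD p.2 0 then PySem.Set.add scoring p.1 else scoring
      if PySem.Set.contains seq_values p.2 then PySem.Set.add scoring p.1 else scoring)
    PySem.Set.empty

-- ===== PORT B =====
def pvInRun (present : PySem.Set Int) (v : Int) : Bool :=
  (PySem.Set.contains present (v - 2) && PySem.Set.contains present (v - 1))
  || (PySem.Set.contains present (v - 1) && PySem.Set.contains present (v + 1))
  || (PySem.Set.contains present (v + 1) && PySem.Set.contains present (v + 2))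

def pvIsScoringValue (present : PySem.Set Int) (counts : PySem.Dict Int Int) (v : Int) : Bool :=
  if v = 1 ∨ v = 5 ∨ 2 ≤ counts.getD v 0 then true
  else pvInRun present v

def get_potentially_scoring_indices_d20_t1_py_alt (dice : List Int) : List Int :=
  let present := PySem.Set.ofList dice
  let counts := PySem.Dict.counter dice
  (PySem.List.enumerate dice).foldl
    (fun s p => if pvIsScoringValue present counts p.2 then PySem.Set.add s p.1 else s)
    PySem.Set.empty

-- ===== PRECONDITION & SPEC =====
def Spec_get_potentially_scoring_indices_d20_t1_py (dice : List Int) (out : List Int) : Prop := out = get_potentially_scoring_indices_d20_t1_py_alt dice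
instance (dice : List Int) (out : List Int) : Decidable (Spec_get_potentially_scoring_indices_d20_t1_py dice out) := by unfold Spec_get_potentially_scoring_indices_d20_t1_py; infer_instance

-- ===== CLAIM (what is proved, stated in full; the proofs are below) =====
def Claim_equal_get_potentially_scoring_indices_d20_t1_py : Prop := ∀ (dice : List Int), Dom_get_potentially_scoring_indices_d20_t1_py dice → Spec_get_potentially_scoring_indices_d20_t1_py dice (get_potentially_scoring_indices_d20_t1_py dice)

-- ===== LEMMAS AND PROOFS =====

-- window predicate: some 3-window around v lies entirely in s
def pvW (s : List Int) (v : Int) : Prop :=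
  (v - 2 ∈ s ∧ v - 1 ∈ s) ∨ (v - 1 ∈ s ∧ v + 1 ∈ s) ∨ (v + 1 ∈ s ∧ v + 2 ∈ s)

theorem pvSeqRun_spec : ∀ (r : List Int) (x : Int), (x :: r).Pairwise (· < ·) →
    r = (pvSeqRun x r).1 ++ (pvSeqRun x r).2 ∧
    (∀ v : Int, v ∈ (pvSeqRun x r).1 ↔ (x < v ∧ v ≤ x + (pvSeqRun x r).1.length)) ∧
    (∀ v ∈ (pvSeqRun x r).2, x + (pvSeqRun x r).1.length + 2 ≤ v) := by
  intro r
  induction r with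
  | nil => intro x _; refine ⟨rfl, ?_, ?_⟩ <;> simp [pvSeqRun]
  | cons y r ih =>
    intro x hp
    by_cases h : y = x + 1
    · have e : pvSeqRun x (y :: r) = (y :: (pvSeqRun y r).1, (pvSeqRun y r).2) := by
        rw [pvSeqRun]; simp [h]
      have hp' : (y :: r).Pairwise (· < ·) := hp.of_cons
      obtain ⟨h1, h2, h3⟩ := ih y hp'
      rw [e]
      refine ⟨by simpa using h1, ?_, ?_⟩
      · intro v
        simp only [List.mem_cons, List.length_cons]
        rw [h2 v]
        have : y = x + 1 := h
        push_cast
        omega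
      · intro v hv
        have := h3 v hv
        have : y = x + 1 := h
        simp only [List.length_cons]
        push_cast
        omega
    · have e : pvSeqRun x (y :: r) = ([], y :: r) := by
        rw [pvSeqRun]; simp [h]
      have hxy : x < y := (List.pairwise_cons.mp hp).1 y (by simp)
      have hall : ∀ v ∈ r, y < v := by
        intro v hv; exact (List.pairwise_cons.mp hp.of_cons).1 v hv
      rw [e]
      refine ⟨by simp, ?_, ?_⟩
      · intro v; simp
      · intro v hv
        simp only [List.mem_cons] at hv
        rcases hv with rfl | hv
        · simp; omega
        · have := hall v hv; simp; omega

set_option maxHeartbeats 1600000 in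
theorem pv_mem_seqLoop (acc : PySem.Set Int) (s : List Int) (hs : s.Pairwise (· < ·)) (v : Int) :
    v ∈ pvSeqLoop acc s ↔ v ∈ acc ∨ (v ∈ s ∧ pvW s v) := by
  induction acc, s using pvSeqLoop.induct with
  | case1 acc => simp [pvSeqLoop]
  | case2 acc x r ih =>
    obtain ⟨hsplit, hmem1, hrem⟩ := pvSeqRun_spec r x hs
    set s1 := (pvSeqRun x r).1 with hs1
    set rem := (pvSeqRun x r).2 with hrem'
    set k : Int := (s1.length : Int) with hk
    -- rem is pairwise
    have hprem : rem.Pairwise (· < ·) := by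
      have : r.Pairwise (· < ·) := hs.of_cons
      rw [hsplit] at this
      exact (List.pairwise_append.mp this).2.1
    -- full-list membership characterisation
    have hS : ∀ w : Int, w ∈ (x :: r) ↔ ((x ≤ w ∧ w ≤ x + k) ∨ w ∈ rem) := by
      intro w
      constructor
      · intro hw
        rcases List.mem_cons.mp hw with rfl | hw
        · have h0 : (0:Int) ≤ k := by rw [hk]; positivity
          exact Or.inl ⟨by omega, by omega⟩
        · rw [hsplit] at hw
          rcases List.mem_append.mp hw with hw | hw
          · left; have := (hmem1 w).mp hw; omega
          · right; exact hw
      · intro hw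
        rcases hw with ⟨hw1, hw2⟩ | hw
        · by_cases hwx : w = x
          · simp [hwx]
          · have : w ∈ s1 := (hmem1 w).mpr (by omega)
            exact List.mem_cons_of_mem _ (hsplit ▸ List.mem_append_left _ this)
        · exact List.mem_cons_of_mem _ (hsplit ▸ List.mem_append_right _ hw)
    have hremlo : ∀ w ∈ rem, x + k + 2 ≤ w := hrem
    simp only [dite_eq_ite] at ih
    rw [pvSeqLoop]
    rw [← hs1, ← hrem']
    rw [ih hprem]
    -- membership in the updated accumulator
    have hacc : v ∈ (if 3 ≤ (x :: s1).length then PySem.Set.update acc (x :: s1) else acc) ↔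
        (v ∈ acc ∨ (2 ≤ k ∧ x ≤ v ∧ v ≤ x + k)) := by
      split_ifs with hlen
      · rw [PySem.Set.mem_update]
        have hvrun : v ∈ x :: s1 ↔ (x ≤ v ∧ v ≤ x + k) := by
          simp only [List.mem_cons, hmem1 v]
          omega
        simp only [List.length_cons] at hlen
        rw [hvrun]
        have : (2:Int) ≤ k := by rw [hk]; omega
        tauto
      · simp only [List.length_cons] at hlen
        have : ¬ (2:Int) ≤ k := by rw [hk]; omega
        tauto
    rw [hacc]
    -- core combinatorial step
    have key : ((2 ≤ k ∧ x ≤ v ∧ v ≤ x + k) ∨ (v ∈ rem ∧ pvW rem v)) ↔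
        ((v ∈ (x :: r)) ∧ pvW (x :: r) v) := by
      by_cases hv : x ≤ v ∧ v ≤ x + k
      · -- v lies in the run
        have hvnr : v ∉ rem := fun h => by have := hremlo v h; omega
        have hvin : v ∈ (x :: r) := (hS v).mpr (Or.inl hv)
        constructor
        · rintro (⟨h2k, _⟩ | ⟨hvr, _⟩)
          · refine ⟨hvin, ?_⟩
            by_cases hc1 : x + 2 ≤ v
            · exact Or.inl ⟨(hS _).mpr (Or.inl (by omega)), (hS _).mpr (Or.inl (by omega))⟩
            · by_cases hc2 : v = x + 1
              · exact Or.inr (Or.inl ⟨(hS _).mpr (Or.inl (by omega)), (hS _).mpr (Or.inl (by omega))⟩)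
              · have : v = x := by omega
                exact Or.inr (Or.inr ⟨(hS _).mpr (Or.inl (by omega)), (hS _).mpr (Or.inl (by omega))⟩)
          · exact absurd hvr hvnr
        · rintro ⟨-, hw⟩
          left
          refine ⟨?_, hv⟩
          rcases hw with ⟨ha, hb⟩ | ⟨ha, hb⟩ | ⟨ha, hb⟩
          · rcases (hS _).mp ha with h | h
            · omega
            · have := hremlo _ h; omega
          · rcases (hS _).mp hb with h | h
            · rcases (hS _).mp ha with h' | h'
              · omega
              · have := hremlo _ h'; omega
            · have := hremlo _ h; omega
          · rcases (hS _).mp ha with h | h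
            · rcases (hS _).mp hb with h' | h'
              · omega
              · have := hremlo _ h'; omega
            · have := hremlo _ h; omega
      · -- v outside the run
        have h2f : ¬ (2 ≤ k ∧ x ≤ v ∧ v ≤ x + k) := by tauto
        by_cases hvr : v ∈ rem
        · have hvlo : x + k + 2 ≤ v := hremlo v hvr
          have hvin : v ∈ (x :: r) := (hS v).mpr (Or.inr hvr)
          -- membership transfer for values above the run
          have F : ∀ w : Int, x + k + 1 ≤ w → (w ∈ (x :: r) ↔ w ∈ rem) := by
            intro w hw
            rw [hS w]
            constructor
            · rintro (h | h); omega; exact h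
            · exact Or.inr
          have hWiff : pvW rem v ↔ pvW (x :: r) v := by
            constructor
            · rintro (⟨ha, hb⟩ | ⟨ha, hb⟩ | ⟨ha, hb⟩)
              · exact Or.inl ⟨(hS _).mpr (Or.inr ha), (hS _).mpr (Or.inr hb)⟩
              · exact Or.inr (Or.inl ⟨(hS _).mpr (Or.inr ha), (hS _).mpr (Or.inr hb)⟩)
              · exact Or.inr (Or.inr ⟨(hS _).mpr (Or.inr ha), (hS _).mpr (Or.inr hb)⟩)
            · rintro (⟨ha, hb⟩ | ⟨ha, hb⟩ | ⟨ha, hb⟩)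
              · have hb' : v - 1 ∈ rem := (F _ (by omega)).mp hb
                have : x + k + 2 ≤ v - 1 := hremlo _ hb'
                have ha' : v - 2 ∈ rem := (F _ (by omega)).mp ha
                exact Or.inl ⟨ha', hb'⟩
              · exact Or.inr (Or.inl ⟨(F _ (by omega)).mp ha, (F _ (by omega)).mp hb⟩)
              · exact Or.inr (Or.inr ⟨(F _ (by omega)).mp ha, (F _ (by omega)).mp hb⟩)
          rw [hWiff]
          tauto
        · have hvnin : v ∉ (x :: r) := by
            intro h
            rcases (hS v).mp h with h' | h'
            · exact hv h'
            · exact hvr h'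
          tauto
    tauto

-- the per-value condition of A equals the per-value condition of B, for values of the roll
set_option maxHeartbeats 1600000 in
theorem pv_cond_eq (dice : List Int) (v : Int) (hv : v ∈ dice) :
    PySem.Set.contains
      (pvSeqLoop PySem.Set.empty (PySem.List.sorted (PySem.Set.ofList dice) (fun x => x) false)) v
      = pvInRun (PySem.Set.ofList dice) v := by
  have hpw := PySem.List.sorted_ofList_pairwise_lt (xs := dice)
  have hmemS : ∀ w : Int,
      w ∈ PySem.List.sorted (PySem.Set.ofList dice) (fun x => x) false ↔ w ∈ dice := by
    intro w
    rw [PySem.List.mem_sorted, PySem.Set.mem_ofList]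
  rw [Bool.eq_iff_iff]
  rw [PySem.Set.contains_iff]
  rw [pv_mem_seqLoop _ _ hpw]
  simp only [pvInRun, pvW, Bool.or_eq_true, Bool.and_eq_true, PySem.Set.contains_iff,
    PySem.Set.mem_ofList, hmemS, PySem.Set.empty]
  simp [hv]
  tauto

-- adding the same element twice is adding it once
theorem pv_add_add (s : PySem.Set Int) (i : Int) :
    PySem.Set.add (PySem.Set.add s i) i = PySem.Set.add s i := by
  by_cases h : i ∈ s <;> simp [PySem.Set.add, PySem.Set.contains, h]

theorem get_potentially_scoring_indices_d20_t1_py_eq (dice : List Int) :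
    get_potentially_scoring_indices_d20_t1_py dice = get_potentially_scoring_indices_d20_t1_py_alt dice := by
  unfold get_potentially_scoring_indices_d20_t1_py get_potentially_scoring_indices_d20_t1_py_alt
  apply PySem.List.foldl_congr_mem
  intro acc p hp
  have hval : p.2 ∈ dice := by
    rw [PySem.List.mem_enumerate_iff] at hp
    obtain ⟨k, hk, rfl⟩ := hp
    exact List.getElem_mem hk
  have hc := pv_cond_eq dice p.2 hval
  have hcount : (PySem.Dict.counter dice).getD p.2 0 = (dice.count p.2 : Int) :=
    PySem.Dict.getD_counter dice p.2
  have hmem3 : (p.2 ∈ pvSeqLoop PySem.Set.empty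
      (PySem.List.sorted (PySem.Set.ofList dice) (fun x => x) false)) ↔
      pvInRun (PySem.Set.ofList dice) p.2 = true := by
    rw [← PySem.Set.contains_iff, hc]
  simp only [PySem.Set.empty] at hmem3
  by_cases h1 : p.2 = 1 ∨ p.2 = 5 <;>
  by_cases h2 : 2 ≤ ((dice.count p.2 : Int)) <;>
  by_cases h3 : pvInRun (PySem.Set.ofList dice) p.2 = true <;>
  simp [pvIsScoringValue, hcount, h1, h2, h3, hmem3, pv_add_add, PySem.Set.empty]

-- ===== VERDICT (by name: the statement is the Claim_ definition above) =====
theorem get_potentially_scoring_indices_d20_t1_py_spec : Claim_equal_get_potentially_scoring_indices_d20_t1_py := by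
  intro dice _
  unfold Spec_get_potentially_scoring_indices_d20_t1_py
  exact get_potentially_scoring_indices_d20_t1_py_eq dice
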